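-- pv_equiv track=rewrite | github.com/huggin/gfg | binary_search/number_subsets_product_less_than_k.py | calc
-- ===== SOURCE A (Python) =====
-- def calc(a, lo, hi, K):
--     ans = []
--     for i in range(1, 1 << (hi - lo)):
--         temp = 1
--         for j in range(lo, hi):
--             if (1 << (j - lo)) & i:
--                 temp *= a[j]
--         if temp <= K:
--             ans.append(temp)
--
--     return ans
-- ===== SOURCE B (Python) =====
-- def calc(a, lo, hi, K):
--     # Doubling: after processing a[lo..j], prods[m] is the product of the
--     # subset of processed elements selected by bitmask m, in mask order.
--     prods = [1]
--     for j in range(lo, hi):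
--         x = a[j]
--         prods += [p * x for p in prods]
--     return [p for p in prods[1:] if p <= K]
-- ===== Notes on version B (the rewrite author's own statement) =====
-- stated objective: alternative
-- what changed: Instead of recomputing each subset product with an inner loop over all bit positions of every mask, B builds all subset products by doubling (for each element, append the x-multiples of the products built so far), which yields exactly the mask-order list; this trades the per-mask bit loop for list doubling (measured at parity in CPython).
-- crash fix: When hi < lo, A raises ValueError (negative shift count in 1 << (hi - lo)) while B returns []. — e.g. on calc([], 1, 0, 5): A raises ValueError, B returns []
import Mathlib
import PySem

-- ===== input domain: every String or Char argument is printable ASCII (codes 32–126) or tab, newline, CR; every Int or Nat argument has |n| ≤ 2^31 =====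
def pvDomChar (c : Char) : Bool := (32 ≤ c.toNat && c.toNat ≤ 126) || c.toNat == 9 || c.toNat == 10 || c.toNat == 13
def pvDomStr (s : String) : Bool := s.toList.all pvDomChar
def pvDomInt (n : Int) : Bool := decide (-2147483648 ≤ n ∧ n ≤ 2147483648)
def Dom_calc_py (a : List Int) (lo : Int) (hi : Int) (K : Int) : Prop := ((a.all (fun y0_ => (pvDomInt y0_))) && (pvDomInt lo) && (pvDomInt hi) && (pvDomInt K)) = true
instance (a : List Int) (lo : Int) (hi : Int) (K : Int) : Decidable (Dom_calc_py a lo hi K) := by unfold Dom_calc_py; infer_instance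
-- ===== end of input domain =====

-- B replaces A's per-mask inner bit loop by a doubling DP over the elements; equal return values on Pre_.

-- ===== PORT A =====
-- literal port of A: outer loop over masks i = 1 .. 2^(hi-lo)-1, inner loop over j = lo .. hi-1
-- testing bit (j-lo) of i; '1 << (j - lo)' is '(1 : Int) <<< (j - lo).toNat' (inside the loop j - lo ≥ 0),
-- 'a[j]' is PySem.List.pyGetD (in range under Pre_).
def calc_py (a : List Int) (lo : Int) (hi : Int) (K : Int) : List Int :=
  (PySem.List.pyRange 1 ((1 : Int) <<< (hi - lo).toNat) 1).foldl
    (fun ans i =>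
      let temp :=
        (PySem.List.pyRange lo hi 1).foldl
          (fun temp j =>
            if PySem.Int.band ((1 : Int) <<< (j - lo).toNat) i ≠ 0 then
              temp * PySem.List.pyGetD a j 0
            else temp) 1
      if temp ≤ K then ans ++ [temp] else ans) []

-- ===== PORT B =====
-- literal port of Source B: doubling loop building prods, then a filtered comprehension over prods[1:]
def calc_py_alt (a : List Int) (lo : Int) (hi : Int) (K : Int) : List Int :=
  let prods :=
    (PySem.List.pyRange lo hi 1).foldl
      (fun prods j =>
        let x := PySem.List.pyGetD a j 0
        prods ++ prods.map (· * x)) [1]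
  (PySem.List.slice prods (some 1) none).filter (fun p => decide (p ≤ K))

-- ===== PRECONDITION & SPEC =====
-- Pre_ excludes exactly the inputs where A raises: hi < lo (ValueError: negative shift count)
-- and, when the loop indexes at all (lo < hi), any index j ∈ [lo, hi) outside Python's index range of a (IndexError).
def Pre_calc_py (a : List Int) (lo : Int) (hi : Int) (K : Int) : Prop :=
  lo ≤ hi ∧ (lo < hi → (-(a.length : Int) ≤ lo ∧ hi ≤ (a.length : Int)))
instance (a : List Int) (lo : Int) (hi : Int) (K : Int) : Decidable (Pre_calc_py a lo hi K) := by unfold Pre_calc_py; infer_instance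
def pvWitness_calc_py : List Int × Int × Int × Int := ([2, 3, 5], 0, 3, 10)

-- When hi < lo, A raises ValueError (negative shift count in 1 << (hi - lo)) while B returns [].
def Raises_calc_py (a : List Int) (lo : Int) (hi : Int) (K : Int) : Prop := hi < lo
instance (a : List Int) (lo : Int) (hi : Int) (K : Int) : Decidable (Raises_calc_py a lo hi K) := by unfold Raises_calc_py; infer_instance
def pvRaiseWitness_calc_py : List Int × Int × Int × Int := ([], 1, 0, 5)
def pvRaiseWitnessOut_calc_py : List Int := []

def Spec_calc_py (a : List Int) (lo : Int) (hi : Int) (K : Int) (out : List Int) : Prop := out = calc_py_alt a lo hi K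
instance (a : List Int) (lo : Int) (hi : Int) (K : Int) (out : List Int) : Decidable (Spec_calc_py a lo hi K out) := by unfold Spec_calc_py; infer_instance

-- ===== CLAIM (what is proved, stated in full; the proofs are below) =====
def Claim_equal_calc_py : Prop := ∀ (a : List Int) (lo : Int) (hi : Int) (K : Int), Dom_calc_py a lo hi K → Pre_calc_py a lo hi K → Spec_calc_py a lo hi K (calc_py a lo hi K)
def Claim_raises_calc_py : Prop := (∀ (a : List Int) (lo : Int) (hi : Int) (K : Int), Dom_calc_py a lo hi K → Raises_calc_py a lo hi K → ¬ Pre_calc_py a lo hi K) ∧ (Dom_calc_py (pvRaiseWitness_calc_py.1) (pvRaiseWitness_calc_py.2.1) (pvRaiseWitness_calc_py.2.2.1) (pvRaiseWitness_calc_py.2.2.2) ∧ Raises_calc_py (pvRaiseWitness_calc_py.1) (pvRaiseWitness_calc_py.2.1) (pvRaiseWitness_calc_py.2.2.1) (pvRaiseWitness_calc_py.2.2.2) ∧ calc_py_alt (pvRaiseWitness_calc_py.1) (pvRaiseWitness_calc_py.2.1) (pvRaiseWitness_calc_py.2.2.1) (pvRaiseWitness_calc_py.2.2.2) = pvRaise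WitnessOut_calc_py)

-- ===== LEMMAS AND PROOFS =====

-- product of the subset of xs selected by the bits of the mask m (bit 0 ↔ head)
def bitProd : List Int → Nat → Int
  | [], _ => 1
  | x :: xs, m => (if m % 2 = 1 then x else 1) * bitProd xs (m / 2)

theorem bitProd_concat (xs : List Int) (x : Int) :
    ∀ m : Nat, m < 2 ^ (xs.length + 1) →
      bitProd (xs ++ [x]) m =
        if m < 2 ^ xs.length then bitProd xs m else bitProd xs (m - 2 ^ xs.length) * x := by
  induction xs with
  | nil =>
      intro m hm
      simp only [List.length_nil, pow_succ, pow_zero, one_mul] at hm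
      interval_cases m <;> simp [bitProd]
  | cons y ys ih =>
      intro m hm
      have hlen : (y :: ys).length = ys.length + 1 := rfl
      have hm2 : m / 2 < 2 ^ (ys.length + 1) := by
        have : m < 2 ^ (ys.length + 1) * 2 := by
          simpa [pow_succ, Nat.mul_comm, Nat.mul_assoc] using hm
        omega
      have := ih (m / 2) hm2
      simp only [List.cons_append, bitProd, this]
      by_cases hlt : m < 2 ^ (y :: ys).length
      · have h1 : m / 2 < 2 ^ ys.length := by
          simp only [hlen, pow_succ] at hlt; omega
        simp only [if_pos hlt, if_pos h1]
      · have h1 : ¬ m / 2 < 2 ^ ys.length := by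
          simp only [hlen, pow_succ] at hlt; omega
        have hmod : (m - 2 ^ (y :: ys).length) % 2 = m % 2 := by
          simp only [hlen, pow_succ] at hlt ⊢; omega
        have hdiv : (m - 2 ^ (y :: ys).length) / 2 = m / 2 - 2 ^ ys.length := by
          simp only [hlen, pow_succ] at hlt ⊢; omega
        simp only [if_neg hlt, if_neg h1, hmod, hdiv, mul_assoc]

-- the doubling loop of B builds exactly the mask-indexed product table
theorem doubling_eq (ys : List Int) :
    ys.foldl (fun p x => p ++ p.map (· * x)) ([1] : List Int)
      = (List.range (2 ^ ys.length)).map (bitProd ys) := by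
  induction ys using List.reverseRecOn with
  | nil => simp [bitProd]
  | append_singleton xs x ih =>
      rw [List.foldl_append, List.foldl_cons, List.foldl_nil, ih]
      have hsplit : List.range (2 ^ (xs ++ [x]).length)
          = List.range (2 ^ xs.length) ++ (List.range (2 ^ xs.length)).map (2 ^ xs.length + ·) := by
        have : 2 ^ (xs ++ [x]).length = 2 ^ xs.length + 2 ^ xs.length := by
          simp [pow_succ, Nat.mul_two]
        rw [this, List.range_add]
      rw [hsplit, List.map_append, List.map_map, List.map_map]
      congr 1
      · apply List.map_congr_left
        intro m hm
        have hm' : m < 2 ^ xs.length := List.mem_range.mp hm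
        rw [bitProd_concat xs x m (by have := hm'; simp; omega)]
        simp [hm']
      · apply List.map_congr_left
        intro m hm
        have hm' : m < 2 ^ xs.length := List.mem_range.mp hm
        have hb : 2 ^ xs.length + m < 2 ^ (xs.length + 1) := by
          simp [pow_succ]; omega
        simp only [Function.comp_apply]
        rw [bitProd_concat xs x (2 ^ xs.length + m) (by simpa using hb)]
        simp

-- bit test of A's inner loop, Nat mask form
theorem band_shift_ne (k m : Nat) :
    (PySem.Int.band ((1 : Int) <<< k) (m : Int) ≠ 0) ↔ m.testBit k := by
  have h1 : (1 : Int) <<< k = ((2 ^ k : Nat) : Int) := by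
    simp [Int.shiftLeft_eq]
  rw [h1, PySem.Int.band_natCast, ne_eq, Int.natCast_eq_zero, ← ne_eq,
    Nat.and_comm, Nat.and_two_pow]
  rcases h : m.testBit k with _ | _ <;> simp

-- A's inner loop computes bitProd of the addressed elements
theorem inner_eq (a : List Int) :
    ∀ (n : Nat) (lo hi : Int), (hi - lo).toNat = n →
    ∀ (m : Nat) (acc : Int),
      (PySem.List.pyRange lo hi 1).foldl
        (fun temp j =>
          if PySem.Int.band ((1 : Int) <<< (j - lo).toNat) (m : Int) ≠ 0 then
            temp * PySem.List.pyGetD a j 0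
          else temp) acc
      = acc * bitProd ((PySem.List.pyRange lo hi 1).map (fun j => PySem.List.pyGetD a j 0)) m := by
  intro n
  induction n with
  | zero =>
      intro lo hi hn m acc
      rw [PySem.List.pyRange_one_eq_nil (by omega)]
      simp [bitProd]
  | succ n ih =>
      intro lo hi hn m acc
      have hlt : lo < hi := by omega
      rw [PySem.List.pyRange_one_cons hlt]
      simp only [List.foldl_cons, List.map_cons, bitProd]
      have h0 : ((lo - lo).toNat) = 0 := by omega
      rw [h0]
      have hbit : (PySem.Int.band ((1 : Int) <<< (0:Nat)) (m : Int) ≠ 0) ↔ m % 2 = 1 := by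
        rw [band_shift_ne]; simp [Nat.testBit_zero]
      have hcongr :
          (PySem.List.pyRange (lo + 1) hi 1).foldl
            (fun temp j =>
              if PySem.Int.band ((1 : Int) <<< (j - lo).toNat) (m : Int) ≠ 0 then
                temp * PySem.List.pyGetD a j 0
              else temp)
            (if PySem.Int.band ((1 : Int) <<< (0:Nat)) (m : Int) ≠ 0 then acc * PySem.List.pyGetD a lo 0 else acc)
          = (PySem.List.pyRange (lo + 1) hi 1).foldl
            (fun temp j =>
              if PySem.Int.band ((1 : Int) <<< (j - (lo + 1)).toNat) ((m / 2 : Nat) : Int) ≠ 0 then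
                temp * PySem.List.pyGetD a j 0
              else temp)
            (if PySem.Int.band ((1 : Int) <<< (0:Nat)) (m : Int) ≠ 0 then acc * PySem.List.pyGetD a lo 0 else acc) := by
        apply PySem.List.foldl_congr_mem
        intro acc' j hj
        have hj' : lo + 1 ≤ j := (PySem.List.mem_pyRange_one.mp hj).1
        have hk : (j - lo).toNat = (j - (lo + 1)).toNat + 1 := by omega
        rw [hk]
        congr 1
        simp only [eq_iff_iff]
        rw [band_shift_ne, band_shift_ne, Nat.testBit_add_one]
      rw [hcongr, ih (lo + 1) hi (by omega) (m / 2)]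
      simp only [hbit]
      by_cases hm : m % 2 = 1 <;> (simp [hm]; try ring)

-- ===== VERDICT (by name: the statement is the Claim_ definition above) =====
-- the two ports agree on every input (the precondition is only needed for the Python side)
theorem ports_eq (a : List Int) (lo : Int) (hi : Int) (K : Int) :
    calc_py a lo hi K = calc_py_alt a lo hi K := by
  unfold calc_py calc_py_alt
  have hshift : (1 : Int) <<< (hi - lo).toNat = ((2 ^ (hi - lo).toNat : Nat) : Int) := by
    simp [Int.shiftLeft_eq]
  set n := (hi - lo).toNat with hn
  set g : Int → Int := fun j => PySem.List.pyGetD a j 0 with hg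
  set elems : List Int := (PySem.List.pyRange lo hi 1).map g with helems
  have hlen : elems.length = n := by
    simp [helems, PySem.List.length_pyRange_one, hn]
  -- A side: replace the inner loop by bitProd via inner_eq
  have hstepA :
      (PySem.List.pyRange 1 ((1 : Int) <<< n) 1).foldl
        (fun ans i =>
          let temp :=
            (PySem.List.pyRange lo hi 1).foldl
              (fun temp j =>
                if PySem.Int.band ((1 : Int) <<< (j - lo).toNat) i ≠ 0 then
                  temp * PySem.List.pyGetD a j 0
                else temp) 1
          if temp ≤ K then ans ++ [temp] else ans) []
      = (PySem.List.pyRange 1 ((1 : Int) <<< n) 1).foldl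
        (fun ans i =>
          if bitProd elems i.toNat ≤ K then ans ++ [bitProd elems i.toNat] else ans) [] := by
    apply PySem.List.foldl_congr_mem
    intro acc i hi'
    have h1 : (1 : Int) ≤ i := (PySem.List.mem_pyRange_one.mp hi').1
    have hcast : i = ((i.toNat : Nat) : Int) := by omega
    have := inner_eq a n lo hi hn.symm i.toNat 1
    rw [hcast]
    simp only [this, one_mul, Int.toNat_natCast, helems, hg]
  rw [hstepA, PySem.List.foldl_append_ite
    (p := fun i : Int => bitProd elems i.toNat ≤ K) (f := fun i : Int => bitProd elems i.toNat)]
  -- B side: the doubling loop is the mask-product table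
  have hB :
      (PySem.List.pyRange lo hi 1).foldl
        (fun prods j =>
          let x := PySem.List.pyGetD a j 0
          prods ++ prods.map (· * x)) [1]
      = (List.range (2 ^ n)).map (bitProd elems) := by
    have : (PySem.List.pyRange lo hi 1).foldl
        (fun prods j =>
          let x := PySem.List.pyGetD a j 0
          prods ++ prods.map (· * x)) ([1] : List Int)
        = elems.foldl (fun p x => p ++ p.map (· * x)) [1] := by
      rw [helems, List.foldl_map]
    rw [this, doubling_eq, hlen]
  rw [hB]
  show _ = List.filter (fun p => decide (p ≤ K))
    (PySem.List.slice (List.map (bitProd elems) (List.range (2 ^ n))) (some 1) none)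
  rw [PySem.List.slice_from_one]
  -- both sides are the same filtered map over range (2^n - 1), shifted by one
  have hpos : 0 < 2 ^ n := Nat.two_pow_pos n
  have hrange : PySem.List.pyRange 1 ((1 : Int) <<< n) 1
      = (List.range (2 ^ n - 1)).map (fun k : Nat => 1 + (k : Int)) := by
    rw [hshift, PySem.List.pyRange_one]
    congr 1
    rw [← Nat.cast_one (R := Int), ← Nat.cast_sub Nat.one_le_two_pow, Int.toNat_natCast]
  have htail : (List.range (2 ^ n)).tail = (List.range (2 ^ n - 1)).map (fun k => k + 1) := by
    have h1 : 2 ^ n = (2 ^ n - 1) + 1 := by omega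
    rw [h1, List.range_succ_eq_map]
    simp
  have hnat : ∀ k : Nat, ((1 : Int) + (k : Int)).toNat = k + 1 := by intro k; omega
  rw [hrange, ← List.map_tail, htail]
  simp only [List.nil_append, List.filter_map, List.map_map, Function.comp_def, hnat]

theorem calc_py_spec : Claim_equal_calc_py := by
  intro a lo hi K _ _
  unfold Spec_calc_py
  exact ports_eq a lo hi K

@[simp] theorem calc_py_raises : Claim_raises_calc_py := by
  unfold Claim_raises_calc_py
  constructor
  · intro a lo hi K _ hr hp
    exact absurd hp.1 (by exact not_le.mpr hr)
  · exact ⟨by decide, by decide, by decide⟩
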